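-- pv_equiv track=rewrite | github.com/shandley/ICTV-git | src/converters/msl_to_git.py | _clean_name_for_path
-- ===== SOURCE A (Python) =====
-- def _clean_name_for_path(name: str) -> str:
--     """Clean taxonomic name for use in file paths."""
--     if not name:
--         return ""
--
--     # Convert to lowercase and replace problematic characters
--     clean = name.lower()
--     clean = clean.replace(' ', '_')
--     clean = clean.replace('/', '_')
--     clean = clean.replace('\\', '_')
--     clean = clean.replace(':', '_')
--     clean = clean.replace('*', '_')
--     clean = clean.replace('?', '_')
--     clean = clean.replace('"', '_')
--     clean = clean.replace('<', '_')
--     clean = clean.replace('>', '_')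
--     clean = clean.replace('|', '_')
--     clean = clean.replace('(', '_')
--     clean = clean.replace(')', '_')
--     clean = clean.replace('[', '_')
--     clean = clean.replace(']', '_')
--     clean = clean.replace(',', '_')
--     clean = clean.replace(';', '_')
--     clean = clean.replace("'", '_')
--
--     # Remove multiple underscores
--     while '__' in clean:
--         clean = clean.replace('__', '_')
--
--     # Remove leading/trailing underscores
--     clean = clean.strip('_')
--
--     return clean
-- ===== SOURCE B (Python) =====
-- def _clean_name_for_path(name: str) -> str:
--     """Clean taxonomic name for use in file paths (single pass)."""
--     if not name:
--         return ""
--     forbidden = set(' /\\:*?"<>|()[],;\'')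
--     out = []
--     for c in name.lower():
--         ch = '_' if c in forbidden else c
--         if ch == '_' and out and out[-1] == '_':
--             continue
--         out.append(ch)
--     return ''.join(out).strip('_')
-- ===== Notes on version B (the rewrite author's own statement) =====
-- stated objective: alternative
-- what changed: Replaces the 17 sequential whole-string replace() passes plus the fixpoint double-underscore-collapsing while loop by one single pass over the lowered string that maps each forbidden character to an underscore and collapses underscore runs on the fly, followed by the same final strip.
import Mathlib
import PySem

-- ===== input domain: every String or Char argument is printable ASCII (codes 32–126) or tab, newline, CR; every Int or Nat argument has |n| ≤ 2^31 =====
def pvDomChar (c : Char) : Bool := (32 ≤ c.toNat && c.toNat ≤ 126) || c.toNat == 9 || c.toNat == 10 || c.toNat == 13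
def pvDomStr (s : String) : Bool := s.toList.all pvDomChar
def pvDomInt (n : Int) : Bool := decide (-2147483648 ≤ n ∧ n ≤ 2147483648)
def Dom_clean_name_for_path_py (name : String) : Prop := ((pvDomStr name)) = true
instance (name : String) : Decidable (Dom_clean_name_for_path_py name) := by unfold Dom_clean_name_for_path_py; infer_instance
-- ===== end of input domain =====

-- B replaces A's 17 whole-string replace() passes + fixpoint '__'-collapsing loop by one
-- single pass that maps forbidden characters to '_' and collapses underscore runs on the fly.

-- ===== PORT A =====
-- Model of one pass of clean.replace('__', '_') (leftmost, non-overlapping); needed by the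
-- termination proof of the while loop below (pvReplace_dec), cited there by name.
def pvRep2 : List Char → List Char
  | [] => []
  | [a] => [a]
  | a :: b :: t => if a = '_' ∧ b = '_' then '_' :: pvRep2 t else a :: pvRep2 (b :: t)

theorem pvGo_eq (l acc : List Char) (fuel : Nat) (h : l.length ≤ fuel) :
    PySem.Chars.replace.go ['_','_'] ['_'] fuel l acc = acc.reverse ++ pvRep2 l := by
  induction l using pvRep2.induct generalizing acc fuel with
  | case1 =>
    cases fuel <;> simp [PySem.Chars.replace.go, pvRep2]
  | case2 a =>
    cases fuel with
    | zero => simp at h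
    | succ f =>
      simp only [PySem.Chars.replace.go]
      rw [if_neg (by simp [List.isPrefixOf])]
      cases f <;> simp [PySem.Chars.replace.go, pvRep2]
  | case3 a b t hcond ih =>
    obtain ⟨rfl, rfl⟩ := hcond
    cases fuel with
    | zero => simp at h
    | succ f =>
      simp only [PySem.Chars.replace.go]
      rw [if_pos (by simp [List.isPrefixOf])]
      simp only [List.length_cons, List.drop_succ_cons, List.length_nil, List.drop_zero]
      rw [ih _ f (by simp at h ⊢; omega)]
      simp [pvRep2]
  | case4 a b t hcond ih =>
    cases fuel with
    | zero => simp at h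
    | succ f =>
      simp only [PySem.Chars.replace.go]
      rw [if_neg ?_]
      · rw [ih _ f (by simp at h ⊢; omega)]
        simp [pvRep2, hcond]
      · simp [List.isPrefixOf]
        intro h1 h2
        exact hcond ⟨h1.symm, h2.symm⟩

theorem pvReplace_eq_rep2 (l : List Char) :
    PySem.Chars.replace l ['_','_'] ['_'] = pvRep2 l := by
  simp [PySem.Chars.replace]
  exact pvGo_eq l [] l.length le_rfl

theorem pvRep2_length_le (l : List Char) : (pvRep2 l).length ≤ l.length := by
  induction l using pvRep2.induct with
  | case1 => simp [pvRep2]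
  | case2 a => simp [pvRep2]
  | case3 a b t hcond ih =>
    obtain ⟨rfl, rfl⟩ := hcond
    simp [pvRep2]; omega
  | case4 a b t hcond ih =>
    simp [pvRep2, hcond]
    simpa using ih

theorem pvReplace_dec (l : List Char) (h : PySem.Chars.isIn ['_','_'] l = true) :
    (PySem.Chars.replace l ['_','_'] ['_']).length < l.length := by
  rw [pvReplace_eq_rep2]
  rw [PySem.Chars.isIn_iff_infix] at h
  induction l using pvRep2.induct with
  | case1 => simp at h
  | case2 a =>
    exact absurd (List.IsInfix.length_le h) (by simp)
  | case3 a b t hcond ih =>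
    obtain ⟨rfl, rfl⟩ := hcond
    have := pvRep2_length_le t
    simp [pvRep2]; omega
  | case4 a b t hcond ih =>
    have h' : ['_','_'] <:+: b :: t := by
      rcases List.infix_cons_iff.mp h with hp | hi
      · exact absurd ⟨List.cons_prefix_cons.mp hp |>.1.symm,
          (List.cons_prefix_cons.mp (List.cons_prefix_cons.mp hp).2).1.symm⟩ hcond
      · exact hi
    have := ih h'
    simp [pvRep2, hcond] at this ⊢
    omega

-- the Python 'while "__" in clean: clean = clean.replace("__", "_")'
def pvCollapse (s : String) : String :=
  if h : PySem.Str.isIn "__" s then pvCollapse (PySem.Str.replace s "__" "_") else s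
termination_by s.toList.length
decreasing_by
  have h' : PySem.Chars.isIn ['_','_'] s.toList = true := by
    have hb : PySem.Str.isIn "__" s = PySem.Chars.isIn ['_','_'] s.toList := rfl
    rw [← hb]; exact h
  have hres := pvReplace_dec s.toList h'
  have hb2 : (PySem.Str.replace s "__" "_").toList
      = PySem.Chars.replace s.toList ['_','_'] ['_'] := by
    rw [PySem.Str.toList_replace, show ("__" : String).toList = ['_','_'] from rfl,
      show ("_" : String).toList = ['_'] from rfl]
  rw [hb2]; exact hres

def clean_name_for_path_py (name : String) : String :=
  if name = "" then ""
  else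
    let clean := PySem.Str.lower name
    let clean := PySem.Str.replace clean " " "_"
    let clean := PySem.Str.replace clean "/" "_"
    let clean := PySem.Str.replace clean "\\" "_"
    let clean := PySem.Str.replace clean ":" "_"
    let clean := PySem.Str.replace clean "*" "_"
    let clean := PySem.Str.replace clean "?" "_"
    let clean := PySem.Str.replace clean "\"" "_"
    let clean := PySem.Str.replace clean "<" "_"
    let clean := PySem.Str.replace clean ">" "_"
    let clean := PySem.Str.replace clean "|" "_"
    let clean := PySem.Str.replace clean "(" "_"
    let clean := PySem.Str.replace clean ")" "_"
    let clean := PySem.Str.replace clean "[" "_"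
    let clean := PySem.Str.replace clean "]" "_"
    let clean := PySem.Str.replace clean "," "_"
    let clean := PySem.Str.replace clean ";" "_"
    let clean := PySem.Str.replace clean "'" "_"
    let clean := pvCollapse clean
    PySem.Str.stripChars clean "_"

-- ===== PORT B =====
def pvForbidden (c : Char) : Bool :=
  [' ', '/', '\\', ':', '*', '?', '"', '<', '>', '|', '(', ')', '[', ']', ',', ';', '\''].contains c

-- the single building pass of B: out.append(ch) unless ch = '_' and out[-1] = '_'
def pvBuild : List Char → List Char → List Char
  | out, [] => out
  | out, c :: rest =>
    let ch := if pvForbidden c then '_' else c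
    if ch = '_' ∧ PySem.List.pyGet? out (-1) = some '_' then pvBuild out rest
    else pvBuild (out ++ [ch]) rest

def clean_name_for_path_py_alt (name : String) : String :=
  if name = "" then ""
  else PySem.Str.stripChars (String.ofList (pvBuild [] (PySem.Str.lower name).toList)) "_"

-- ===== PRECONDITION & SPEC =====
def Spec_clean_name_for_path_py (name : String) (out : String) : Prop := out = clean_name_for_path_py_alt name
instance (name : String) (out : String) : Decidable (Spec_clean_name_for_path_py name out) := by unfold Spec_clean_name_for_path_py; infer_instance

-- ===== CLAIM (what is proved, stated in full; the proofs are below) =====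
def Claim_equal_clean_name_for_path_py : Prop := ∀ (name : String), Dom_clean_name_for_path_py name → Spec_clean_name_for_path_py name (clean_name_for_path_py name)

-- ===== LEMMAS AND PROOFS =====
-- what B's pass converts one character into
def pvMapC (c : Char) : Char := if pvForbidden c then '_' else c

-- run-collapsing, parametrised by whether the previous emitted char was '_'
def pvSq : Bool → List Char → List Char
  | _, [] => []
  | b, c :: t => if c = '_' then (if b then pvSq true t else '_' :: pvSq true t) else c :: pvSq false t

theorem pvSq_rep2 (b : Bool) (l : List Char) : pvSq b (pvRep2 l) = pvSq b l := by
  induction l using pvRep2.induct generalizing b with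
  | case1 => simp [pvRep2]
  | case2 a => simp [pvRep2]
  | case3 a c t hcond ih =>
    obtain ⟨rfl, rfl⟩ := hcond
    cases b <;> simp [pvRep2, pvSq, ih]
  | case4 a c t hcond ih =>
    by_cases ha : a = '_'
    · subst ha
      have hc : ¬ c = '_' := fun hc => hcond ⟨rfl, hc⟩
      cases b <;> simp [pvRep2, pvSq, hc, ih]
    · cases b <;> simp [pvRep2, pvSq, ha, ih]

theorem pvSq_fix (l : List Char) (h : ¬ (['_','_'] <:+: l)) :
    pvSq false l = l ∧ (l.head? ≠ some '_' → pvSq true l = l) := by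
  induction l with
  | nil => simp [pvSq]
  | cons c t ih =>
    have ht : ¬ (['_','_'] <:+: t) := fun hi => h (List.infix_cons_iff.mpr (Or.inr hi))
    obtain ⟨ih1, ih2⟩ := ih ht
    by_cases hc : c = '_'
    · subst hc
      have hh : t.head? ≠ some '_' := by
        intro hh
        cases t with
        | nil => simp at hh
        | cons d t' =>
          simp at hh; subst hh
          exact h (List.infix_cons_iff.mpr (Or.inl (by simp [List.cons_prefix_cons])))
      constructor
      · simp [pvSq, ih2 hh]
      · intro hne; simp at hne
    · constructor
      · simp [pvSq, hc, ih1]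
      · intro _; simp [pvSq, hc, ih1]

theorem pvCollapse_aux (n : Nat) :
    ∀ s : String, s.toList.length ≤ n → (pvCollapse s).toList = pvSq false s.toList := by
  induction n with
  | zero =>
    intro s hs
    have hnil : s.toList = [] := List.eq_nil_of_length_eq_zero (Nat.le_zero.mp hs)
    rw [pvCollapse]
    split_ifs with h
    · exfalso
      have hb : PySem.Str.isIn "__" s = PySem.Chars.isIn ['_','_'] s.toList := rfl
      rw [hb, PySem.Chars.isIn_iff_infix, hnil] at h
      simpa using List.IsInfix.length_le h
    · rw [hnil]; rfl
  | succ n ih =>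
    intro s hs
    rw [pvCollapse]
    split_ifs with h
    · have hb : PySem.Str.isIn "__" s = PySem.Chars.isIn ['_','_'] s.toList := rfl
      rw [hb] at h
      have hb2 : (PySem.Str.replace s "__" "_").toList
          = PySem.Chars.replace s.toList ['_','_'] ['_'] := by
        rw [PySem.Str.toList_replace, show ("__" : String).toList = ['_','_'] from rfl,
          show ("_" : String).toList = ['_'] from rfl]
      have hlt := pvReplace_dec s.toList h
      rw [ih (PySem.Str.replace s "__" "_") (by rw [hb2]; omega)]
      rw [hb2, pvReplace_eq_rep2, pvSq_rep2]
    · have hb : PySem.Str.isIn "__" s = PySem.Chars.isIn ['_','_'] s.toList := rfl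
      rw [hb] at h
      have h' : PySem.Chars.isIn ['_','_'] s.toList = false := by simpa using h
      have hni : ¬ (['_','_'] <:+: s.toList) := by
        rw [← PySem.Chars.isIn_iff_infix]
        simp [h']
      exact ((pvSq_fix s.toList hni).1).symm

theorem pvCollapse_toList (s : String) : (pvCollapse s).toList = pvSq false s.toList :=
  pvCollapse_aux s.toList.length s le_rfl

theorem pvBuild_eq (l out : List Char) :
    pvBuild out l = out ++ pvSq (decide (PySem.List.pyGet? out (-1) = some '_')) (l.map pvMapC) := by
  induction l generalizing out with
  | nil => simp [pvBuild, pvSq]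
  | cons c rest ih =>
    show (let ch := if pvForbidden c then '_' else c;
      if ch = '_' ∧ PySem.List.pyGet? out (-1) = some '_' then pvBuild out rest
      else pvBuild (out ++ [ch]) rest) = _
    simp only []
    by_cases hch : (if pvForbidden c then '_' else c) = '_'
    · by_cases hlast : PySem.List.pyGet? out (-1) = some '_'
      · rw [if_pos ⟨hch, hlast⟩, ih]
        simp [pvSq, List.map_cons, pvMapC, hch, hlast]
      · rw [if_neg (by simp [hlast]), ih]
        rw [hch]
        simp [pvSq, List.map_cons, pvMapC, hch, hlast,
          PySem.List.pyGet?_neg_one_append_singleton]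
    · rw [if_neg (by simp [hch]), ih]
      simp [pvSq, List.map_cons, pvMapC, hch,
        PySem.List.pyGet?_neg_one_append_singleton]

theorem pvBuild_nil (l : List Char) : pvBuild [] l = pvSq false (l.map pvMapC) := by
  have := pvBuild_eq l []
  simpa [PySem.List.pyGet?] using this

-- one single-character replace() is a map over the characters
theorem pvGo1_eq (a b : Char) (l acc : List Char) (fuel : Nat) (h : l.length ≤ fuel) :
    PySem.Chars.replace.go [a] [b] fuel l acc
      = acc.reverse ++ l.map (fun c => if c = a then b else c) := by
  induction l generalizing acc fuel with
  | nil => cases fuel <;> simp [PySem.Chars.replace.go]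
  | cons c t ih =>
    cases fuel with
    | zero => simp at h
    | succ f =>
      by_cases hc : c = a
      · subst hc
        simp only [PySem.Chars.replace.go]
        rw [if_pos (by simp [List.isPrefixOf])]
        simp only [List.length_cons, List.drop_succ_cons, List.length_nil, List.drop_zero]
        rw [ih _ f (by simpa using h)]
        simp
      · simp only [PySem.Chars.replace.go]
        rw [if_neg (by simp [List.isPrefixOf]; exact fun hh => hc hh.symm)]
        rw [ih _ f (by simpa using h)]
        simp [hc]

theorem pvReplace1_eq (a b : Char) (l : List Char) :
    PySem.Chars.replace l [a] [b] = l.map (fun c => if c = a then b else c) := by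
  simp [PySem.Chars.replace]
  exact pvGo1_eq a b l [] l.length le_rfl

-- cumulative version of B's character map, used to absorb A's replaces one at a time
def pvMapUpto (xs : List Char) (c : Char) : Char := if xs.contains c then '_' else c

theorem pvBase (x : Char) (L : List Char) :
    List.map (fun c => if c = x then '_' else c) L = List.map (pvMapUpto [x]) L := by
  apply List.map_congr_left
  intro c _
  by_cases hc : c = x
  · subst hc; simp [pvMapUpto]
  · simp [pvMapUpto, hc]

theorem pvStep (x : Char) (xs : List Char) (L : List Char) :
    List.map (fun c => if c = x then '_' else c) (List.map (pvMapUpto xs) L)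
      = List.map (pvMapUpto (xs ++ [x])) L := by
  rw [List.map_map]
  apply List.map_congr_left
  intro c _
  simp only [Function.comp_apply]
  unfold pvMapUpto
  by_cases hc : xs.contains c = true
  · simp only [hc, if_true, List.contains_append]
    split_ifs <;> simp_all
  · simp only [hc, if_false, Bool.false_eq_true, List.contains_append]
    by_cases hx : c = x
    · subst hx; simp_all
    · simp_all

-- ===== VERDICT (by name: the statement is the Claim_ definition above) =====
set_option maxHeartbeats 1600000 in
theorem clean_name_for_path_py_spec : Claim_equal_clean_name_for_path_py := by
  intro name _
  unfold Spec_clean_name_for_path_py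
  by_cases hn : name = ""
  · simp [clean_name_for_path_py, clean_name_for_path_py_alt, hn]
  · apply String.toList_inj.mp
    simp only [clean_name_for_path_py, clean_name_for_path_py_alt, if_neg hn]
    have hstrip : ∀ s : String, (PySem.Str.stripChars s "_").toList
        = PySem.Chars.stripChars s.toList ['_'] := by
      intro s
      rw [PySem.Str.toList_stripChars, show ("_" : String).toList = ['_'] from rfl]
    rw [hstrip, hstrip]
    refine congrArg (fun l => PySem.Chars.stripChars l ['_']) ?_
    rw [pvCollapse_toList]
    rw [String.toList_ofList, pvBuild_nil]
    refine congrArg (pvSq false) ?_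
    have hr : ∀ (a : Char) (s : String), (PySem.Str.replace s (String.ofList [a]) "_").toList
        = s.toList.map (fun c => if c = a then '_' else c) := by
      intro a s
      rw [PySem.Str.toList_replace, String.toList_ofList,
        show ("_" : String).toList = ['_'] from rfl, pvReplace1_eq]
    have e1 : (" " : String) = String.ofList [' '] := rfl
    have e2 : ("/" : String) = String.ofList ['/'] := rfl
    have e3 : ("\\" : String) = String.ofList ['\\'] := rfl
    have e4 : (":" : String) = String.ofList [':'] := rfl
    have e5 : ("*" : String) = String.ofList ['*'] := rfl
    have e6 : ("?" : String) = String.ofList ['?'] := rfl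
    have e7 : ("\"" : String) = String.ofList ['"'] := rfl
    have e8 : ("<" : String) = String.ofList ['<'] := rfl
    have e9 : (">" : String) = String.ofList ['>'] := rfl
    have e10 : ("|" : String) = String.ofList ['|'] := rfl
    have e11 : ("(" : String) = String.ofList ['('] := rfl
    have e12 : (")" : String) = String.ofList [')'] := rfl
    have e13 : ("[" : String) = String.ofList ['['] := rfl
    have e14 : ("]" : String) = String.ofList [']'] := rfl
    have e15 : ("," : String) = String.ofList [','] := rfl
    have e16 : (";" : String) = String.ofList [';'] := rfl
    have e17 : ("'" : String) = String.ofList ['\''] := rfl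
    rw [e1, e2, e3, e4, e5, e6, e7, e8, e9, e10, e11, e12, e13, e14, e15, e16, e17]
    rw [hr, hr, hr, hr, hr, hr, hr, hr, hr, hr, hr, hr, hr, hr, hr, hr, hr]
    rw [PySem.Str.toList_lower]
    rw [pvBase ' ']
    rw [pvStep '/' [' ']]
    simp only [List.cons_append, List.nil_append]
    rw [pvStep '\\' [' ', '/']]
    simp only [List.cons_append, List.nil_append]
    rw [pvStep ':' [' ', '/', '\\']]
    simp only [List.cons_append, List.nil_append]
    rw [pvStep '*' [' ', '/', '\\', ':']]
    simp only [List.cons_append, List.nil_append]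
    rw [pvStep '?' [' ', '/', '\\', ':', '*']]
    simp only [List.cons_append, List.nil_append]
    rw [pvStep '"' [' ', '/', '\\', ':', '*', '?']]
    simp only [List.cons_append, List.nil_append]
    rw [pvStep '<' [' ', '/', '\\', ':', '*', '?', '"']]
    simp only [List.cons_append, List.nil_append]
    rw [pvStep '>' [' ', '/', '\\', ':', '*', '?', '"', '<']]
    simp only [List.cons_append, List.nil_append]
    rw [pvStep '|' [' ', '/', '\\', ':', '*', '?', '"', '<', '>']]
    simp only [List.cons_append, List.nil_append]
    rw [pvStep '(' [' ', '/', '\\', ':', '*', '?', '"', '<', '>', '|']]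
    simp only [List.cons_append, List.nil_append]
    rw [pvStep ')' [' ', '/', '\\', ':', '*', '?', '"', '<', '>', '|', '(']]
    simp only [List.cons_append, List.nil_append]
    rw [pvStep '[' [' ', '/', '\\', ':', '*', '?', '"', '<', '>', '|', '(', ')']]
    simp only [List.cons_append, List.nil_append]
    rw [pvStep ']' [' ', '/', '\\', ':', '*', '?', '"', '<', '>', '|', '(', ')', '[']]
    simp only [List.cons_append, List.nil_append]
    rw [pvStep ',' [' ', '/', '\\', ':', '*', '?', '"', '<', '>', '|', '(', ')', '[', ']']]
    simp only [List.cons_append, List.nil_append]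
    rw [pvStep ';' [' ', '/', '\\', ':', '*', '?', '"', '<', '>', '|', '(', ')', '[', ']', ',']]
    simp only [List.cons_append, List.nil_append]
    rw [pvStep '\'' [' ', '/', '\\', ':', '*', '?', '"', '<', '>', '|', '(', ')', '[', ']', ',', ';']]
    simp only [List.cons_append, List.nil_append]
    apply List.map_congr_left
    intro c _
    rfl
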